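-- pv_equiv track=rewrite | github.com/TKojima85th/A3divider | app.py | generate_booklet_mapping
-- ===== SOURCE A (Python) =====
-- def generate_booklet_mapping(total_pages):
--     """
--     Generate booklet page mapping using the discovered formula
--
--     Args:
--         total_pages: Total number of A4 pages in the final document (must be multiple of 4)
--
--     Returns:
--         List of tuples: (A3_sheet_number, [left_A4_page, right_A4_page])
--     """
--     # Ensure total_pages is multiple of 4
--     if total_pages % 4 != 0:
--         padded_pages = ((total_pages + 3) // 4) * 4
--         total_pages = padded_pages
--
--     S = total_pages // 2  # Number of A3 sheets
--     mapping = []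
--
--     for i in range(1, S + 1):  # A3 sheet numbers 1 to S
--         j = i - 1  # 0-based index
--         b = j % 2  # 0 for even positions, 1 for odd positions
--
--         # Apply the formula from Codex analysis:
--         # Left(i) = S + (2b - 1) * j + b
--         # Right(i) = T + 1 - Left(i)
--         left = S + (2 * b - 1) * j + b
--         right = total_pages + 1 - left
--
--         mapping.append((i, [left, right]))
--
--     return mapping
-- ===== SOURCE B (Python) =====
-- def generate_booklet_mapping(total_pages):
--     """Staged construction: build the descending and ascending left-page
--     sequences as separate lists, interleave them, then enumerate sheets."""
--     if total_pages % 4 != 0: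
--         total_pages = ((total_pages + 3) // 4) * 4
--     S = total_pages // 2
--     half = S // 2
--     downs = [S - 2 * k for k in range(half)]
--     ups = [S + 2 + 2 * k for k in range(half)]
--     lefts = [x for du in zip(downs, ups) for x in du]
--     return [(i, [left, total_pages + 1 - left])
--             for i, left in enumerate(lefts, start=1)]
-- ===== Notes on version B (the rewrite author's own statement) =====
-- stated objective: alternative
-- what changed: Instead of one loop over sheet numbers with a parity branch and a per-index formula, B builds the descending and ascending left-page arithmetic sequences as two separate lists, interleaves them with zip, and enumerates the interleaving to attach sheet numbers and right pages.
import Mathlib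
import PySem

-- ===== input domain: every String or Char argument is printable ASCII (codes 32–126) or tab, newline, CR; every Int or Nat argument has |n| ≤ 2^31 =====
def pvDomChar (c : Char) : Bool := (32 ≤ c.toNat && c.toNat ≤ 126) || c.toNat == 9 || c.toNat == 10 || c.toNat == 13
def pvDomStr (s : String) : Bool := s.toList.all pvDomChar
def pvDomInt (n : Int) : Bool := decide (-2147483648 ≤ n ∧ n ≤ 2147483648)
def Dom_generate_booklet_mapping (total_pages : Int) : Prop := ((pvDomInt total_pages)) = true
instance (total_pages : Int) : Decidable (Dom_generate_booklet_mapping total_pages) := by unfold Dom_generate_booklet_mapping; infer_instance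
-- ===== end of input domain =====

-- B replaces A's single parity-branched loop by a staged construction: the two
-- left-page arithmetic sequences are built as separate lists, interleaved with
-- zip, and enumerated (objective: alternative, same O(n) cost).

-- ===== PORT A =====
def generate_booklet_mapping (total_pages : Int) : List (Int × List Int) :=
  let T := if PySem.Int.mod total_pages 4 != 0
           then (PySem.Int.floordiv (total_pages + 3) 4) * 4
           else total_pages
  let S := PySem.Int.floordiv T 2
  (PySem.List.pyRange 1 (S + 1) 1).foldl
    (fun mapping i =>
      let j := i - 1
      let b := PySem.Int.mod j 2
      let left := S + (2 * b - 1) * j + b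
      let right := T + 1 - left
      mapping ++ [(i, [left, right])]) []

-- ===== PORT B =====
def generate_booklet_mapping_alt (total_pages : Int) : List (Int × List Int) :=
  let T := if PySem.Int.mod total_pages 4 != 0
           then (PySem.Int.floordiv (total_pages + 3) 4) * 4
           else total_pages
  let S := PySem.Int.floordiv T 2
  let half := PySem.Int.floordiv S 2
  let downs := (PySem.List.pyRange 0 half 1).map (fun k => S - 2 * k)
  let ups := (PySem.List.pyRange 0 half 1).map (fun k => S + 2 + 2 * k)
  let lefts := (downs.zip ups).flatMap (fun du => [du.1, du.2])
  (PySem.List.enumerate lefts 1).map (fun p => (p.1, [p.2, T + 1 - p.2]))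

-- ===== PRECONDITION & SPEC =====
def Spec_generate_booklet_mapping (total_pages : Int) (out : List (Int × List Int)) : Prop := out = generate_booklet_mapping_alt total_pages
instance (total_pages : Int) (out : List (Int × List Int)) : Decidable (Spec_generate_booklet_mapping total_pages out) := by unfold Spec_generate_booklet_mapping; infer_instance

-- ===== CLAIM (what is proved, stated in full; the proofs are below) =====
def Claim_equal_generate_booklet_mapping : Prop := ∀ (total_pages : Int), Dom_generate_booklet_mapping total_pages → Spec_generate_booklet_mapping total_pages (generate_booklet_mapping total_pages)

-- ===== LEMMAS AND PROOFS =====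

-- For every m, A's fold over sheets 1..2m equals B's staged list built from
-- range 0..m (S and T arbitrary integers here; A's loop bound is 2m).
theorem pv_main (T S : Int) (m : Nat) :
    (PySem.List.pyRange 1 (2 * (m : Int) + 1) 1).foldl
      (fun mapping i =>
        let j := i - 1
        let b := PySem.Int.mod j 2
        let left := S + (2 * b - 1) * j + b
        let right := T + 1 - left
        mapping ++ [(i, [left, right])]) []
    =
    (PySem.List.enumerate
      ((((PySem.List.pyRange 0 (m : Int) 1).map (fun k => S - 2 * k)).zip
        ((PySem.List.pyRange 0 (m : Int) 1).map (fun k => S + 2 + 2 * k))).flatMap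
        (fun du => [du.1, du.2])) 1).map (fun p => (p.1, [p.2, T + 1 - p.2])) := by
  induction m with
  | zero => simp [PySem.List.pyRange_one_eq_nil, PySem.List.enumerate_nil]
  | succ m ih =>
    -- split A's range: 1..(2m+2) = 1..2m ++ [2m+1, 2m+2]
    have hA : PySem.List.pyRange 1 (2 * ((m : Int) + 1) + 1) 1
        = PySem.List.pyRange 1 (2 * (m : Int) + 1) 1 ++ [2 * (m : Int) + 1, 2 * (m : Int) + 2] := by
      have h1 := PySem.List.pyRange_one_succ_right (a := 1) (b := 2 * (m : Int) + 2) (by omega)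
      have h2 := PySem.List.pyRange_one_succ_right (a := 1) (b := 2 * (m : Int) + 1) (by omega)
      have : (2 * ((m : Int) + 1) + 1) = (2 * (m : Int) + 2) + 1 := by ring
      rw [this, h1]
      have : (2 * (m : Int) + 2) = (2 * (m : Int) + 1) + 1 := by ring
      rw [this, h2]
      simp
    -- split B's range: 0..(m+1) = 0..m ++ [m]
    have hB : PySem.List.pyRange 0 ((m : Int) + 1) 1
        = PySem.List.pyRange 0 (m : Int) 1 ++ [(m : Int)] := by
      simpa using PySem.List.pyRange_one_succ_right (a := 0) (b := (m : Int)) (by omega)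
    have hlen : ∀ f : Int → Int,
        ((PySem.List.pyRange 0 (m : Int) 1).map f).length = m := by
      intro f; simp [PySem.List.length_pyRange_one]
    push_cast
    rw [hA, List.foldl_append, ih, hB]
    rw [List.map_append, List.map_append,
        List.zip_append (by rw [hlen, hlen]),
        List.flatMap_append, PySem.List.enumerate_append, List.map_append]
    -- lengths: the interleaved prefix has 2m elements
    have hflen : ((((PySem.List.pyRange 0 (m : Int) 1).map (fun k => S - 2 * k)).zip
        ((PySem.List.pyRange 0 (m : Int) 1).map (fun k => S + 2 + 2 * k))).flatMap
        (fun du => [du.1, du.2])).length = 2 * m := by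
      rw [List.length_flatMap]
      have : ∀ du : Int × Int, ((fun du : Int × Int => [du.1, du.2]) du).length = 2 := by
        intro du; rfl
      simp [List.length_zip, hlen]; omega
    -- the two freshly appended entries coincide
    have hm1 : PySem.Int.mod (2 * (m : Int) + 1 - 1) 2 = 0 := by
      rw [PySem.Int.mod_eq_emod_of_pos (by omega)]; omega
    have hm2 : PySem.Int.mod (2 * (m : Int) + 2 - 1) 2 = 1 := by
      rw [PySem.Int.mod_eq_emod_of_pos (by omega)]; omega
    simp only [List.foldl_cons, List.foldl_nil, hm1, hm2, List.flatMap_cons,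
      List.zip_cons_cons, hflen, List.map, List.append_assoc]
    norm_num
    and_intros <;> ring
theorem pv_pad_dvd (t : Int) :
    (4 : Int) ∣ (if PySem.Int.mod t 4 != 0
      then (PySem.Int.floordiv (t + 3) 4) * 4 else t) := by
  by_cases h : PySem.Int.mod t 4 = 0
  · rw [PySem.Int.mod_eq_emod_of_pos (by omega)] at h
    simp [h, Int.dvd_of_emod_eq_zero h]
  · have : (PySem.Int.mod t 4 != 0) = true := by simpa using h
    rw [this]
    exact ⟨PySem.Int.floordiv (t + 3) 4, mul_comm _ _⟩

-- ===== VERDICT (by name: the statement is the Claim_ definition above) =====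
theorem generate_booklet_mapping_spec : Claim_equal_generate_booklet_mapping := by
  intro total_pages _
  unfold Spec_generate_booklet_mapping generate_booklet_mapping generate_booklet_mapping_alt
  dsimp only
  obtain ⟨q, hq⟩ := pv_pad_dvd total_pages
  set T := (if PySem.Int.mod total_pages 4 != 0
      then (PySem.Int.floordiv (total_pages + 3) 4) * 4 else total_pages) with hT
  have hS : PySem.Int.floordiv T 2 = 2 * q := by
    rw [PySem.Int.floordiv_eq_ediv_of_pos (by omega), hq]; omega
  have hhalf : PySem.Int.floordiv (2 * q) 2 = q := by
    rw [PySem.Int.floordiv_eq_ediv_of_pos (by omega)]; omega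
  rw [hS, hhalf]
  by_cases hpos : 0 < q
  · obtain ⟨m, hm⟩ : ∃ m : Nat, q = (m : Int) := ⟨q.toNat, by omega⟩
    subst hm
    have := pv_main T (2 * (m : Int)) m
    simpa using this
  · rw [PySem.List.pyRange_one_eq_nil (show 2 * q + 1 ≤ 1 by omega),
        PySem.List.pyRange_one_eq_nil (show q ≤ 0 by omega)]
    simp [PySem.List.enumerate_nil]
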